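-- pv_equiv track=rewrite | github.com/ravi1104/pygames | Guessing_game.py | hint_word
-- ===== SOURCE A (Python) =====
-- def hint_word(word):     #giving Hints to player
--     hint=''
--     hidden=True
--     for i in range(len(word)):
--         if hidden:
--             hint+=word[i]
--         else:
--             hint+='-'
--         hidden=not hidden
--     return hint
-- ===== SOURCE B (Python) =====
-- def hint_word(word):
--     # revealed characters are the even indices; '-' separates them,
--     # with a trailing '-' when the word has even (non-zero) length
--     hint = '-'.join(word[::2])
--     if word and len(word) % 2 == 0:
--         hint += '-'
--     return hint
-- ===== Notes on version B (the rewrite author's own statement) =====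
-- stated objective: simpler
-- what changed: Replaces the per-index loop with a toggle flag by a stride-2 slice joined with a dash separator plus a trailing dash for even-length words.
import Mathlib
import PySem

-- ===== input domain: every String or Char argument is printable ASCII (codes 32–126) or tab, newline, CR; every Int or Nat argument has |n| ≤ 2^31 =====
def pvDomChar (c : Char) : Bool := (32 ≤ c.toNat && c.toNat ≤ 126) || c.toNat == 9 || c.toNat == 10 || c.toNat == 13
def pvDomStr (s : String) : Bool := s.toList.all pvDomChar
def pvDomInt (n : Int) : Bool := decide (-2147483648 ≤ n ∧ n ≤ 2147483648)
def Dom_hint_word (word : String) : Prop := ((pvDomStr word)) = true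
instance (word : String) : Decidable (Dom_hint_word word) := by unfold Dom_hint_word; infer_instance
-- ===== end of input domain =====

-- B replaces A's per-index loop with a toggle flag by a stride-2 slice joined with '-'
-- plus a trailing dash for even-length words (objective: simpler).


-- ===== PORT A =====
-- hint=''; hidden=True; for i in range(len(word)): … ; return hint
-- (word[i] is always in range inside the loop, so pyGetD's default is never used)
def hint_word (word : String) : String :=
  let cs := word.toList
  let st :=
    (PySem.List.pyRange 0 (cs.length : Int) 1).foldl
      (fun (st : List Char × Bool) i =>
        if st.2 then (st.1 ++ [PySem.List.pyGetD cs i ' '], !st.2)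
        else (st.1 ++ ['-'], !st.2))
      ([], true)
  String.ofList st.1

-- ===== PORT B =====
-- hint = '-'.join(word[::2]); if word and len(word) % 2 == 0: hint += '-'
def hint_word_alt (word : String) : String :=
  let cs := word.toList
  let revealed := (PySem.List.slice? cs none none 2).getD []
  let hint := PySem.Chars.join ['-'] (revealed.map (fun c => [c]))
  String.ofList (if cs.length ≠ 0 ∧ cs.length % 2 = 0 then hint ++ ['-'] else hint)

-- ===== PRECONDITION & SPEC =====
def Spec_hint_word (word : String) (out : String) : Prop := out = hint_word_alt word
instance (word : String) (out : String) : Decidable (Spec_hint_word word out) := by unfold Spec_hint_word; infer_instance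

-- ===== CLAIM (what is proved, stated in full; the proofs are below) =====
def Claim_equal_hint_word : Prop := ∀ (word : String), Dom_hint_word word → Spec_hint_word word (hint_word word)

-- ===== LEMMAS AND PROOFS =====

-- the common shape: character at even index, then '-', two by two
def pvSpec : List Char → List Char
  | [] => []
  | [c] => [c]
  | a :: _ :: t => a :: '-' :: pvSpec t

-- the characters B reveals: every second one
def pvEvery2 : List Char → List Char
  | [] => []
  | [c] => [c]
  | a :: _ :: t => a :: pvEvery2 t

def pvF (cs : List Char) (i : Nat) : Char :=
  if i % 2 = 0 then cs.getD i ' ' else '-'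

theorem pvF_shift (a b : Char) (t : List Char) (i : Nat) :
    pvF (a :: b :: t) (i + 2) = pvF t i := by
  simp [pvF, Nat.add_mod_right]

theorem spec_eq_map (cs : List Char) :
    (List.range cs.length).map (pvF cs) = pvSpec cs := by
  fun_induction pvSpec cs with
  | case1 => simp
  | case2 c => simp [pvF]
  | case3 a b t ih =>
    have h2 : (a :: b :: t).length = t.length + 1 + 1 := by simp
    rw [h2, List.range_succ_eq_map, List.range_succ_eq_map]
    simp only [List.map_cons, List.map_map]
    have : (List.range t.length).map (fun i => pvF (a :: b :: t) (i + 1 + 1)) =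
        (List.range t.length).map (pvF t) := by
      apply List.map_congr_left
      intro i _
      exact pvF_shift a b t i
    simp only [Function.comp_def]
    rw [this, ih]
    simp [pvF]

theorem loopA (cs : List Char) (n : Nat) (hn : n ≤ cs.length) :
    (PySem.List.pyRange 0 (n : Int) 1).foldl
      (fun (st : List Char × Bool) i =>
        if st.2 then (st.1 ++ [PySem.List.pyGetD cs i ' '], !st.2)
        else (st.1 ++ ['-'], !st.2))
      ([], true)
    = ((List.range n).map (pvF cs), decide (n % 2 = 0)) := by
  induction n with
  | zero => simp [PySem.List.pyRange]
  | succ m ih =>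
    have hr : PySem.List.pyRange 0 ((m : Int) + 1) 1 =
        PySem.List.pyRange 0 (m : Int) 1 ++ [(m : Int)] :=
      PySem.List.pyRange_one_succ_right (by positivity)
    have hm : ((m + 1 : Nat) : Int) = (m : Int) + 1 := by push_cast; ring
    rw [hm, hr, List.foldl_append, ih (by omega)]
    rw [List.range_succ, List.map_append]
    have hget : PySem.List.pyGetD cs (m : Int) ' ' = cs.getD m ' ' :=
      PySem.List.pyGetD_natCast cs m ' '
    rcases Nat.even_or_odd m with he | ho
    · have h0 : m % 2 = 0 := Nat.even_iff.mp he
      have h1 : (m + 1) % 2 = 1 := by omega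
      simp [h0, h1, hget, pvF]
    · have h0 : m % 2 = 1 := Nat.odd_iff.mp ho
      have h1 : (m + 1) % 2 = 0 := by omega
      simp [h0, h1, pvF]

theorem slice2_eq (cs : List Char) :
    (PySem.List.slice? cs none none 2).getD [] =
      (List.range ((cs.length + 1) / 2)).map (fun k => cs.getD (2 * k) ' ') := by
  simp only [PySem.List.slice?, PySem.List.sliceIndices]
  norm_num
  have hcount : (if 0 < cs.length
      then (((cs.length : Int) + 2 - 1) / 2).toNat else 0) = (cs.length + 1) / 2 := by
    split <;> omega
  rw [hcount]
  rw [List.filterMap_eq_map_iff_forall_eq_some]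
  intro k hk
  have hk' : k < (cs.length + 1) / 2 := List.mem_range.mp hk
  have hlt : 2 * k < cs.length := by omega
  have ht : ((2 : Int) * (k : Int)).toNat = 2 * k := by omega
  rw [ht, List.getElem?_eq_getElem hlt]
  rfl

theorem every2_eq_map (cs : List Char) :
    (List.range ((cs.length + 1) / 2)).map (fun k => cs.getD (2 * k) ' ') = pvEvery2 cs := by
  fun_induction pvEvery2 cs with
  | case1 => simp
  | case2 c => simp
  | case3 a b t ih =>
    have h2 : ((a :: b :: t).length + 1) / 2 = (t.length + 1) / 2 + 1 := by simp; omega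
    rw [h2, List.range_succ_eq_map]
    simp only [List.map_cons, List.map_map, Function.comp_def]
    have : (List.range ((t.length + 1) / 2)).map
        (fun k => (a :: b :: t).getD (2 * (k + 1)) ' ') =
        (List.range ((t.length + 1) / 2)).map (fun k => t.getD (2 * k) ' ') := by
      apply List.map_congr_left
      intro i _
      have : 2 * (i + 1) = 2 * i + 1 + 1 := by ring
      simp [this]
    rw [this, ih]
    rfl

theorem joinSpec (cs : List Char) :
    (PySem.Chars.join ['-'] ((pvEvery2 cs).map (fun c => [c]))) ++
      (if cs.length ≠ 0 ∧ cs.length % 2 = 0 then ['-'] else []) = pvSpec cs := by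
  fun_induction pvSpec cs with
  | case1 => simp [pvEvery2, PySem.Chars.join_nil]
  | case2 c => simp [pvEvery2, PySem.Chars.join_singleton]
  | case3 a b t ih =>
    match t with
    | [] => simp [pvEvery2, pvSpec, PySem.Chars.join_singleton]
    | x :: t' =>
      have he2 : pvEvery2 (x :: t') = x :: pvEvery2 (t'.drop 1) := by
        match t' with
        | [] => rfl
        | _ :: _ => rfl
      rw [show pvEvery2 (a :: b :: x :: t') = a :: pvEvery2 (x :: t') from rfl]
      rw [he2]
      simp only [List.map_cons]
      rw [PySem.Chars.join_cons_cons]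
      rw [show ([x] : List Char) :: List.map (fun c => [c]) (pvEvery2 (t'.drop 1)) =
            List.map (fun c => [c]) (pvEvery2 (x :: t')) from by rw [he2, List.map_cons]]
      have hmod : (a :: b :: x :: t').length % 2 = (x :: t').length % 2 := by
        simp; omega
      have hne : (a :: b :: x :: t').length ≠ 0 := by simp
      have hne' : (x :: t').length ≠ 0 := by simp
      have hcond : (if (a :: b :: x :: t').length ≠ 0 ∧ (a :: b :: x :: t').length % 2 = 0
          then ['-'] else ([] : List Char)) =
          (if (x :: t').length ≠ 0 ∧ (x :: t').length % 2 = 0 then ['-'] else []) := by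
        simp only [hmod, hne, hne', ne_eq, not_false_eq_true, true_and]
      rw [hcond]
      show ([a] ++ ['-'] ++ PySem.Chars.join ['-'] ((pvEvery2 (x :: t')).map (fun c => [c]))) ++ _
          = pvSpec (a :: b :: x :: t')
      rw [List.append_assoc, List.append_assoc, ih]
      rfl

-- ===== VERDICT (by name: the statement is the Claim_ definition above) =====
theorem hint_word_spec : Claim_equal_hint_word := by
  intro word _
  unfold Spec_hint_word hint_word hint_word_alt
  simp only
  rw [loopA word.toList word.toList.length le_rfl]
  rw [slice2_eq, every2_eq_map]
  rw [spec_eq_map]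
  rw [← joinSpec word.toList]
  congr 1
  split <;> simp
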